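-- pv_equiv track=rewrite | github.com/Bovey0809/Algorithm | interview/gcd.py | n_gcd_for_list
-- ===== SOURCE A (Python) =====
-- from itertools import combinations, accumulate
-- from math import gcd
--
-- def lcm(*args):
--     """
--     >>> lcm(1, 2)
--     2
--     >>> lcm(2, 4)
--     4
--     >>> lcm(0, 4)
--     0
--     >>> lcm(1, 2, 3)
--     6
--     >>> lcm(2, 3, 4)
--     12
--     >>> lcm(1, 2, 3, 5)
--     30
--     >>> lcm(2, 3, 4, 5)
--     60
--     """
--     if len(args) == 1:
--         return args
--     a, b = args[:2]
--     if len(args) == 2: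
--         return (a // gcd(a, b) * b)
--     return lcm(lcm(a, b), *args[2:])
--
-- def n_gcd(l, r, n):
--     '''
--     Return the number of gcd(n) in [l, r]
--
--     >>> n_gcd(1, 10, 2)
--     5
--     >>> n_gcd(1, 10, 3)
--     3
--     >>> n_gcd(2, 10, 4)
--     2
--     >>> n_gcd(1, 100, 1)
--     100
--     >>> n_gcd(1, 100, 2)
--     50
--     >>> n_gcd(2, 100, 4)
--     25
--     '''
--     output = r // n - (l // n)
--     return output + 1 if l == n else output
--
-- def n_gcd_for_list(l, r, m, args):
--     """
--     >>> n_gcd_for_list(1, 10, 3, [2, 3, 4])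
--     3
--     >>> n_gcd_for_list(1, 10, 4, [2, 3, 4, 5])
--     2
--     >>> n_gcd_for_list(1, 10, 3, [1, 3, 4])
--     0
--     >>> n_gcd_for_list(2, 100, 2, [2, 4])
--     49
--     """
--     length = r - l + 1
--     for i in args:
--         length -= n_gcd(l, r, i)
--     for n in range(2, m+1):
--         for m in combinations(args, n):
--             if n % 2 == 0:
--                 length += n_gcd(l, r, lcm(*m))
--             else:
--                 length -= n_gcd(l, r, lcm(*m))
--     return int(length)
-- ===== SOURCE B (Python) =====
-- from math import gcd
--
-- def n_gcd_for_list(l, r, m, args):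
--     def cnt(n):
--         q = r // n - l // n
--         return q + 1 if l == n else q
--
--     total = r - l + 1
--     for i in args:
--         total -= cnt(i)
--
--     # Depth-first subset enumeration threading a running lcm: each subset's
--     # inclusion-exclusion term is added exactly once, when its last element
--     # is chosen; subsets of size 1 are already handled by the loop above.
--     def rec(j, cur, k):
--         s = 0
--         for i in range(j, len(args)):
--             x = args[i]
--             nxt = x if k == 0 else cur // gcd(cur, x) * x
--             if 2 <= k + 1 <= m:
--                 s += cnt(nxt) if (k + 1) % 2 == 0 else -cnt(nxt)
--             if k + 1 < m:
--                 s += rec(i + 1, nxt, k + 1)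
--         return s
--
--     return int(total + rec(0, 1, 0))
-- ===== Notes on version B (the rewrite author's own statement) =====
-- stated objective: alternative
-- what changed: Replaces A's size-by-size itertools.combinations double loop (which rebuilds each subset's lcm from scratch and scans range(2,m+1) even past len(args)) with a single depth-first subset recursion over an element index that threads a running lcm, adding each inclusion-exclusion term when its last element is chosen; the singles subtraction is kept as in A.
import Mathlib
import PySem

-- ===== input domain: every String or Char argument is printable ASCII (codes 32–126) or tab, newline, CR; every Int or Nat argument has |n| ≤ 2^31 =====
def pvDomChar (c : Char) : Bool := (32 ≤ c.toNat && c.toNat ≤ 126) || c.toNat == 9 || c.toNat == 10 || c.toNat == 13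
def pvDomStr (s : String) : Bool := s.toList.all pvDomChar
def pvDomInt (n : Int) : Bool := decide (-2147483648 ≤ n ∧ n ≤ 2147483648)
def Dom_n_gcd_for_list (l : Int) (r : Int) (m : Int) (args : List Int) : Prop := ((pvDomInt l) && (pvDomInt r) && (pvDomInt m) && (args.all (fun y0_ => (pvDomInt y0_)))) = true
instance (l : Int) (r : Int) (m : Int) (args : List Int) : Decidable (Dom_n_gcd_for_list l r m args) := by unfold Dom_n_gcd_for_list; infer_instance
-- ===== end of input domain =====

-- B replaces A's size-by-size `combinations` double loop with a depth-first subset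
-- recursion that threads a running lcm (objective: alternative decomposition, shared
-- lcm prefixes; singles subtraction kept as in A).

-- ===== PORT A =====
-- math.gcd (nonnegative gcd of absolute values)
def pvGcd (a b : Int) : Int := (Int.gcd a b : Int)

-- the two-argument case of A's `lcm` (the only one its recursion bottoms out in)
def pvLcm2 (a b : Int) : Int := PySem.Int.floordiv a (pvGcd a b) * b

-- A's variadic `lcm` recursion `lcm(lcm(a,b), *rest)` as a left fold
def pvLcmFold : Int → List Int → Int
  | acc, [] => acc
  | acc, x :: xs => pvLcmFold (pvLcm2 acc x) xs

-- `lcm(*c)` as A calls it (always on tuples of length ≥ 2; other shapes unreachable)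
def pvLcmOf : List Int → Int
  | a :: b :: rest => pvLcmFold (pvLcm2 a b) rest
  | _ => 0

-- A's `n_gcd`
def pvNGcd (l r n : Int) : Int :=
  let output := PySem.Int.floordiv r n - PySem.Int.floordiv l n
  if l = n then output + 1 else output

-- itertools.combinations(xs, k), in itertools' order
def pvCombos : Nat → List Int → List (List Int)
  | 0, _ => [[]]
  | _ + 1, [] => []
  | k + 1, x :: xs => (pvCombos k xs).map (fun c => x :: c) ++ pvCombos (k + 1) xs

def n_gcd_for_list (l : Int) (r : Int) (m : Int) (args : List Int) : Int :=
  let length0 := r - l + 1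
  let length1 := args.foldl (fun acc i => acc - pvNGcd l r i) length0
  (PySem.List.pyRange 2 (m + 1) 1).foldl (fun acc n =>
    (pvCombos n.toNat args).foldl (fun acc2 c =>
      if PySem.Int.mod n 2 = 0 then acc2 + pvNGcd l r (pvLcmOf c)
      else acc2 - pvNGcd l r (pvLcmOf c)) acc) length1

-- ===== PORT B =====
-- Source B's local `cnt`
def pvCnt (l r n : Int) : Int :=
  let q := PySem.Int.floordiv r n - PySem.Int.floordiv l n
  if l = n then q + 1 else q

-- Source B's `rec(j, cur, k)`: the `for i in range(j, len(args))` loop over the suffix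
def pvRec (l r m : Int) : List Int → Int → Int → Int
  | [], _, _ => 0
  | x :: rest, cur, k =>
    let nxt := if k = 0 then x else PySem.Int.floordiv cur (pvGcd cur x) * x
    (if 2 ≤ k + 1 ∧ k + 1 ≤ m then
       (if PySem.Int.mod (k + 1) 2 = 0 then pvCnt l r nxt else -(pvCnt l r nxt))
     else 0)
    + (if k + 1 < m then pvRec l r m rest nxt (k + 1) else 0)
    + pvRec l r m rest cur k

def n_gcd_for_list_alt (l : Int) (r : Int) (m : Int) (args : List Int) : Int :=
  let total := args.foldl (fun acc i => acc - pvCnt l r i) (r - l + 1)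
  total + pvRec l r m args 1 0

-- ===== PRECONDITION & SPEC =====
-- Pre_ excludes only args containing 0, where Python A raises ZeroDivisionError.
def Pre_n_gcd_for_list (l : Int) (r : Int) (m : Int) (args : List Int) : Prop := (0 : Int) ∉ args
instance (l : Int) (r : Int) (m : Int) (args : List Int) : Decidable (Pre_n_gcd_for_list l r m args) := by unfold Pre_n_gcd_for_list; infer_instance
def pvWitness_n_gcd_for_list : Int × Int × Int × List Int := (1, 10, 3, [2, 3, 4])

def Spec_n_gcd_for_list (l : Int) (r : Int) (m : Int) (args : List Int) (out : Int) : Prop := out = n_gcd_for_list_alt l r m args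
instance (l : Int) (r : Int) (m : Int) (args : List Int) (out : Int) : Decidable (Spec_n_gcd_for_list l r m args out) := by unfold Spec_n_gcd_for_list; infer_instance

-- ===== CLAIM (what is proved, stated in full; the proofs are below) =====
def Claim_equal_n_gcd_for_list : Prop := ∀ (l : Int) (r : Int) (m : Int) (args : List Int), Dom_n_gcd_for_list l r m args → Pre_n_gcd_for_list l r m args → Spec_n_gcd_for_list l r m args (n_gcd_for_list l r m args)

-- ===== LEMMAS AND PROOFS =====

-- all subsequences of a list (proof-side enumeration)
def pvSubs : List Int → List (List Int)
  | [] => [[]]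
  | x :: xs => (pvSubs xs).map (fun c => x :: c) ++ pvSubs xs

-- running lcm of B's recursion extended along a chosen subset c
def pvExt : Int → Int → List Int → Int
  | cur, _, [] => cur
  | cur, k, x :: xs => pvExt (if k = 0 then x else pvLcm2 cur x) (k + 1) xs

-- the inclusion–exclusion term contributed by subset c from state (cur, k)
def pvF (l r m k cur : Int) (c : List Int) : Int :=
  if c ≠ [] ∧ 2 ≤ k + (c.length : Int) ∧ k + (c.length : Int) ≤ m then
    (if PySem.Int.mod (k + (c.length : Int)) 2 = 0 then pvCnt l r (pvExt cur k c)
     else -(pvCnt l r (pvExt cur k c)))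
  else 0

lemma pvExt_pos (xs : List Int) (cur k : Int) (hk : 0 < k) :
    pvExt cur k xs = pvLcmFold cur xs := by
  induction xs generalizing cur k with
  | nil => rfl
  | cons x rest ih =>
    simp only [pvExt, pvLcmFold, if_neg (by omega : ¬ k = 0)]
    exact ih _ _ (by omega)

lemma sum_map_zero_of (L : List (List Int)) (f : List Int → Int)
    (h : ∀ c ∈ L, f c = 0) : (L.map f).sum = 0 := by
  induction L with
  | nil => rfl
  | cons c L ih =>
    simp [h c (by simp), ih (fun d hd => h d (by simp [hd]))]

-- Σ over pvSubs of (if c = [] then b else g c) = b + Σ g, given g [] = 0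
lemma pvSubs_sum_nil_case (xs : List Int) (b : Int) (g : List Int → Int) (hg : g [] = 0) :
    ((pvSubs xs).map (fun c => (if c = [] then b else 0) + g c)).sum
      = b + ((pvSubs xs).map g).sum := by
  induction xs with
  | nil => simp [pvSubs, hg]
  | cons x rest ih =>
    simp only [pvSubs, List.map_append, List.sum_append, List.map_map]
    have h1 : ((pvSubs rest).map ((fun c => (if c = [] then b else 0) + g c) ∘ (fun c => x :: c)))
        = (pvSubs rest).map (g ∘ (fun c => x :: c)) := by
      apply List.map_congr_left; intro c _; simp
    rw [h1, ih]
    ring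

lemma pvF_nil (l r m k cur : Int) : pvF l r m k cur [] = 0 := by simp [pvF]

lemma pvF_cons (l r m k cur x : Int) (c : List Int) :
    pvF l r m k cur (x :: c)
      = (if c = [] then
           (if 2 ≤ k + 1 ∧ k + 1 ≤ m then
              (if PySem.Int.mod (k + 1) 2 = 0 then pvCnt l r (if k = 0 then x else pvLcm2 cur x)
               else -(pvCnt l r (if k = 0 then x else pvLcm2 cur x)))
            else 0)
         else 0)
        + pvF l r m (k + 1) (if k = 0 then x else pvLcm2 cur x) c := by
  cases c with
  | nil => simp [pvF, pvExt]
  | cons y c' =>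
    have hlen : k + (((x :: y :: c').length : Nat) : Int) = (k + 1) + (((y :: c').length : Nat) : Int) := by
      simp only [List.length_cons]; push_cast; ring
    simp only [pvF, pvExt, hlen, List.cons_ne_nil, if_neg (by simp : ¬ (y :: c' = [])),
      reduceCtorEq, if_false, ne_eq, not_false_eq_true, true_and, zero_add]

lemma pvF_eq_zero_of_le (l r m k cur : Int) (hm : m ≤ k) (c : List Int) :
    pvF l r m k cur c = 0 := by
  cases c with
  | nil => simp [pvF]
  | cons y c' =>
    apply if_neg
    rintro ⟨-, -, h2⟩
    have : (0 : Int) ≤ ((c'.length : Nat) : Int) := Int.natCast_nonneg _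
    simp only [List.length_cons] at h2
    push_cast at h2
    omega

-- B's recursion computes the subset sum
lemma pvRec_eq_sum (l r m : Int) (suffix : List Int) (cur k : Int) :
    pvRec l r m suffix cur k = ((pvSubs suffix).map (pvF l r m k cur)).sum := by
  induction suffix generalizing cur k with
  | nil => simp [pvRec, pvSubs, pvF_nil]
  | cons x rest ih =>
    simp only [pvRec, pvSubs, List.map_append, List.sum_append, List.map_map]
    have hcomp : ((pvSubs rest).map (pvF l r m k cur ∘ (fun c => x :: c))).sum
        = ((pvSubs rest).map (fun c =>
            (if c = [] then
               (if 2 ≤ k + 1 ∧ k + 1 ≤ m then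
                  (if PySem.Int.mod (k + 1) 2 = 0 then pvCnt l r (if k = 0 then x else pvLcm2 cur x)
                   else -(pvCnt l r (if k = 0 then x else pvLcm2 cur x)))
                else 0)
             else 0)
            + pvF l r m (k + 1) (if k = 0 then x else pvLcm2 cur x) c)).sum := by
      apply congrArg
      apply List.map_congr_left
      intro c _
      exact pvF_cons l r m k cur x c
    rw [hcomp, pvSubs_sum_nil_case _ _ _ (pvF_nil _ _ _ _ _), ih cur k]
    simp only [pvLcm2]
    by_cases hkm : k + 1 < m
    · rw [if_pos hkm, ih _ (k + 1)]
    · rw [if_neg hkm]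
      have hz : ((pvSubs rest).map (pvF l r m (k + 1)
          (if k = 0 then x else PySem.Int.floordiv cur (pvGcd cur x) * x))).sum = 0 :=
        sum_map_zero_of _ _ (fun c _ => pvF_eq_zero_of_le l r m (k + 1) _ (by omega) c)
      rw [hz]

-- a foldl that adds h x each step is init + sum
lemma foldl_step_add {α : Type} (step : Int → α → Int) (h : α → Int)
    (hs : ∀ acc x, step acc x = acc + h x) :
    ∀ (L : List α) (init : Int), L.foldl step init = init + (L.map h).sum := by
  intro L
  induction L with
  | nil => intro init; simp
  | cons x L ih => intro init; simp [hs, ih]; ring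

lemma filter_map_list {p : List Int → Bool} (f : List Int → List Int) (l : List (List Int)) :
    (l.map f).filter p = (l.filter (fun a => p (f a))).map f := by
  induction l with
  | nil => rfl
  | cons a l ih =>
    simp only [List.map_cons, List.filter_cons]
    by_cases h : p (f a) <;> simp [h, ih]

-- pvSubs bucketed by length is pvCombos
lemma pvSubs_filter_length (j : Nat) (xs : List Int) :
    (pvSubs xs).filter (fun c => c.length == j) = pvCombos j xs := by
  induction xs generalizing j with
  | nil =>
    cases j with
    | zero => rfl
    | succ k => rfl
  | cons x rest ih =>
    simp only [pvSubs, List.filter_append, filter_map_list]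
    cases j with
    | zero =>
      have h1 : ((pvSubs rest).filter (fun c => (x :: c).length == 0)) = [] := by
        apply List.filter_eq_nil_iff.mpr
        intro c _
        simp
      rw [h1, ih 0]
      simp [pvCombos]
    | succ k =>
      have h1 : ((pvSubs rest).filter (fun c => (x :: c).length == k + 1))
          = (pvSubs rest).filter (fun c => c.length == k) := by
        apply List.filter_congr
        intro c _
        simp
      rw [h1, ih k, ih (k + 1)]
      rfl

lemma sum_if_key_not_mem {ns : List Int} {v : Int} (hv : v ∉ ns) (t : Int) :
    (ns.map (fun n => if v = n then t else 0)).sum = 0 := by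
  apply List.sum_eq_zero
  intro y hy
  simp only [List.mem_map] at hy
  obtain ⟨n, hn, rfl⟩ := hy
  rw [if_neg]
  intro h
  exact hv (h ▸ hn)

lemma sum_if_key_mem (ns : List Int) (hns : ns.Nodup) (v t : Int) :
    (ns.map (fun n => if v = n then t else 0)).sum = if v ∈ ns then t else 0 := by
  induction ns with
  | nil => simp
  | cons n ns ih =>
    simp only [List.map_cons, List.sum_cons, List.mem_cons]
    rcases List.nodup_cons.mp hns with ⟨hn, hns'⟩
    by_cases h : v = n
    · subst h
      rw [if_pos rfl, sum_if_key_not_mem hn, if_pos (Or.inl rfl)]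
      ring
    · rw [if_neg h, ih hns']
      by_cases h2 : v ∈ ns
      · rw [if_pos h2, if_pos (Or.inr h2)]; ring
      · rw [if_neg h2, if_neg (by rintro (rfl | hh); exact h rfl; exact h2 hh)]; ring

-- partition of a sum over distinct keys
lemma sum_buckets (L : List (List Int)) (ns : List Int) (hns : ns.Nodup)
    (key : List Int → Int) (t : List Int → Int) :
    (ns.map (fun n => ((L.filter (fun c => key c == n)).map t).sum)).sum
      = (L.map (fun c => if key c ∈ ns then t c else 0)).sum := by
  induction L with
  | nil => simp
  | cons c L ihL =>
    simp only [List.map_cons, List.sum_cons]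
    have hstep : ∀ n : Int, ((List.filter (fun c' => key c' == n) (c :: L)).map t).sum
        = (if key c = n then t c else 0) + ((List.filter (fun c' => key c' == n) L).map t).sum := by
      intro n
      by_cases h : key c = n
      · rw [List.filter_cons_of_pos (by simpa using h), if_pos h]
        simp
      · rw [List.filter_cons_of_neg (by simpa using h), if_neg h]
        ring
    have : (ns.map (fun n => ((List.filter (fun c' => key c' == n) (c :: L)).map t).sum)).sum
        = (ns.map (fun n => if key c = n then t c else 0)).sum
          + (ns.map (fun n => ((List.filter (fun c' => key c' == n) L).map t).sum)).sum := by
      rw [← List.sum_map_add]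
      apply congrArg
      apply List.map_congr_left
      intro n _
      exact hstep n
    rw [this, ihL, sum_if_key_mem ns hns]

lemma pvF01 (l r m : Int) (c : List Int) :
    (if ((c.length : Int)) ∈ PySem.List.pyRange 2 (m + 1) 1 then
       (if PySem.Int.mod ((c.length : Int)) 2 = 0 then pvNGcd l r (pvLcmOf c)
        else -(pvNGcd l r (pvLcmOf c)))
     else 0) = pvF l r m 0 1 c := by
  by_cases h : 2 ≤ ((c.length : Int)) ∧ ((c.length : Int)) ≤ m
  · rw [if_pos (by rw [PySem.List.mem_pyRange_one]; omega)]
    match c, h with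
    | a :: b :: cs, h =>
      have hext : pvExt 1 0 (a :: b :: cs) = pvLcmOf (a :: b :: cs) := by
        have h1 : pvExt 1 0 (a :: b :: cs) = pvExt (pvLcm2 a b) 2 cs := by norm_num [pvExt]
        rw [h1, pvExt_pos cs _ 2 (by norm_num)]
        rfl
      have hcond : (a :: b :: cs) ≠ [] ∧ 2 ≤ (((a :: b :: cs).length : Nat) : Int)
          ∧ (((a :: b :: cs).length : Nat) : Int) ≤ m := ⟨List.cons_ne_nil _ _, h.1, h.2⟩
      simp only [pvF, zero_add, hext]
      rw [if_pos hcond]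
      rfl
  · rw [if_neg (by rw [PySem.List.mem_pyRange_one]; omega)]
    symm
    simp only [pvF, zero_add]
    rw [if_neg]
    rintro ⟨-, h2, h3⟩
    exact h ⟨h2, h3⟩

lemma main_eq (l r m : Int) (args : List Int) :
    n_gcd_for_list l r m args = n_gcd_for_list_alt l r m args := by
  have hinner : ∀ (n : Int) (acc : Int),
      (pvCombos n.toNat args).foldl (fun acc2 c =>
        if PySem.Int.mod n 2 = 0 then acc2 + pvNGcd l r (pvLcmOf c)
        else acc2 - pvNGcd l r (pvLcmOf c)) acc
      = acc + ((pvCombos n.toNat args).map (fun c =>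
          if PySem.Int.mod n 2 = 0 then pvNGcd l r (pvLcmOf c)
          else -(pvNGcd l r (pvLcmOf c)))).sum := by
    intro n acc
    apply foldl_step_add
    intro a c
    split_ifs <;> ring
  have houter := foldl_step_add
      (fun acc n => (pvCombos n.toNat args).foldl (fun acc2 c =>
        if PySem.Int.mod n 2 = 0 then acc2 + pvNGcd l r (pvLcmOf c)
        else acc2 - pvNGcd l r (pvLcmOf c)) acc)
      (fun n => ((pvCombos n.toNat args).map (fun c =>
          if PySem.Int.mod n 2 = 0 then pvNGcd l r (pvLcmOf c)
          else -(pvNGcd l r (pvLcmOf c)))).sum)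
      (fun acc n => hinner n acc)
      (PySem.List.pyRange 2 (m + 1) 1)
      (args.foldl (fun acc i => acc - pvNGcd l r i) (r - l + 1))
  have hmap : (PySem.List.pyRange 2 (m + 1) 1).map (fun n => ((pvCombos n.toNat args).map (fun c =>
        if PySem.Int.mod n 2 = 0 then pvNGcd l r (pvLcmOf c)
        else -(pvNGcd l r (pvLcmOf c)))).sum)
      = (PySem.List.pyRange 2 (m + 1) 1).map (fun n =>
          (((pvSubs args).filter (fun c => ((c.length : Int)) == n)).map (fun c =>
            if PySem.Int.mod ((c.length : Int)) 2 = 0 then pvNGcd l r (pvLcmOf c)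
            else -(pvNGcd l r (pvLcmOf c)))).sum) := by
    apply List.map_congr_left
    intro n hn
    rw [PySem.List.mem_pyRange_one] at hn
    have hfilt : pvCombos n.toNat args = (pvSubs args).filter (fun c => ((c.length : Int)) == n) := by
      rw [← pvSubs_filter_length n.toNat args]
      apply List.filter_congr
      intro c _
      by_cases hc : (c.length : Int) = n
      · have hc2 : c.length = n.toNat := by omega
        simp [hc2, Int.toNat_of_nonneg (by omega : (0:Int) ≤ n)]
      · have hc2 : ¬ (c.length = n.toNat) := by omega
        simp [hc, hc2]
    rw [hfilt]
    apply congrArg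
    apply List.map_congr_left
    intro c hc
    have hceq : ((c.length : Int)) = n := by simpa using (List.mem_filter.mp hc).2
    rw [hceq]
  have hbuck := sum_buckets (pvSubs args) (PySem.List.pyRange 2 (m + 1) 1)
      (PySem.List.nodup_pyRange_one 2 (m + 1)) (fun c => ((c.length : Int)))
      (fun c => if PySem.Int.mod ((c.length : Int)) 2 = 0 then pvNGcd l r (pvLcmOf c)
        else -(pvNGcd l r (pvLcmOf c)))
  have hpt : ((pvSubs args).map (fun c =>
        if ((c.length : Int)) ∈ PySem.List.pyRange 2 (m + 1) 1 then
          (if PySem.Int.mod ((c.length : Int)) 2 = 0 then pvNGcd l r (pvLcmOf c)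
           else -(pvNGcd l r (pvLcmOf c)))
        else 0)).sum
      = ((pvSubs args).map (pvF l r m 0 1)).sum := by
    apply congrArg
    apply List.map_congr_left
    intro c _
    exact pvF01 l r m c
  have h0 : n_gcd_for_list l r m args
      = (PySem.List.pyRange 2 (m + 1) 1).foldl (fun acc n =>
          (pvCombos n.toNat args).foldl (fun acc2 c =>
            if PySem.Int.mod n 2 = 0 then acc2 + pvNGcd l r (pvLcmOf c)
            else acc2 - pvNGcd l r (pvLcmOf c)) acc)
          (args.foldl (fun acc i => acc - pvNGcd l r i) (r - l + 1)) := rfl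
  have h1 : n_gcd_for_list_alt l r m args
      = (args.foldl (fun acc i => acc - pvNGcd l r i) (r - l + 1)) + pvRec l r m args 1 0 := rfl
  rw [h0, h1, houter, hmap, hbuck, hpt, pvRec_eq_sum]

-- ===== VERDICT (by name: the statement is the Claim_ definition above) =====
theorem n_gcd_for_list_spec : Claim_equal_n_gcd_for_list := by
  intro l r m args _ _
  exact main_eq l r m args
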